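-- pv_equiv track=rewrite | github.com/nasa/opera-sds | monitoring/opera_daily_products_query.py | remove_trailing_zeros_and_last_entry
-- ===== SOURCE A (Python) =====
-- def remove_trailing_zeros_and_last_entry(lst):
--     """
--     Removes trailing zeros and the last non-zero entry from a list.
--
--     Parameters:
--         lst (list): A list of product summary numbers with trailing zeros.
--
--     Returns:
--         list: A new list with the trailing zeros and the last non-zero entry removed.
--
--     """
--     # Reverse the list to start checking from the end
--     reversed_list = lst[::-1]
--
--     # Find the index of the first non-zero element
--     for i, value in enumerate(reversed_list):
--         if value != 0:
--             # Remove all elements from the first non-zero element onwards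
--             new_list = reversed_list[i + 1:]  # i+1 to skip the first non-zero element found
--             break
--     else:
--         # no zeros in list
--         return []
--
--     # Return the new list in the original order
--     return new_list[::-1]
-- ===== SOURCE B (Python) =====
-- def remove_trailing_zeros_and_last_entry(lst):
--     """Single forward pass: remember the index of the last non-zero element,
--     then slice the list just before it (empty if no non-zero element)."""
--     last = -1
--     for i, value in enumerate(lst):
--         if value != 0:
--             last = i
--     if last == -1:
--         return []
--     return lst[:last]
-- ===== Notes on version B (the rewrite author's own statement) =====
-- stated objective: simpler
-- what changed: Replaces the reversed-copy-and-break scan (two reversals plus a slice of the reversed list) by one forward pass that tracks the last non-zero index and a single lst[:last] slice.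
import Mathlib
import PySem

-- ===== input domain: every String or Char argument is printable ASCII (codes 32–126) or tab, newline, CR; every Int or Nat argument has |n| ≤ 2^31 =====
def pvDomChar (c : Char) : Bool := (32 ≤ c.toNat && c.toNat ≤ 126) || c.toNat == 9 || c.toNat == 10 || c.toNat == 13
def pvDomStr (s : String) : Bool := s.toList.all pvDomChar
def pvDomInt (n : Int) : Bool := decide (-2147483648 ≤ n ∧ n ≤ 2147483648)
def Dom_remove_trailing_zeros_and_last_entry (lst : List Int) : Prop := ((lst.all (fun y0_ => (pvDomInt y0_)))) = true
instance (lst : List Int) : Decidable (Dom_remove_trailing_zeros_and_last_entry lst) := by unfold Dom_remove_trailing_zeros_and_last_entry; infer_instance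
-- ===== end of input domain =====

-- B replaces A's reversed-copy scan with an early break by one forward pass
-- tracking the last non-zero index and a single lst[:last] slice (objective: simpler).

-- ===== PORT A =====
-- the `for i, value in enumerate(reversed_list): if value != 0: … break / else: return []`
-- loop: returns the index of the first non-zero element, or none (the else branch)
def pvA_findNZ : List (Int × Int) → Option Int
  | [] => none
  | (i, v) :: rest => if v ≠ 0 then some i else pvA_findNZ rest

def remove_trailing_zeros_and_last_entry (lst : List Int) : List Int :=
  -- lst[::-1]
  let reversed_list := (PySem.List.slice? lst none none (-1)).getD []
  match pvA_findNZ (PySem.List.enumerate reversed_list) with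
  | some i =>
      -- reversed_list[i + 1:]
      let new_list := PySem.List.slice reversed_list (some (i + 1)) none
      -- new_list[::-1]
      (PySem.List.slice? new_list none none (-1)).getD []
  | none => []

-- ===== PORT B =====
def remove_trailing_zeros_and_last_entry_alt (lst : List Int) : List Int :=
  let last := (PySem.List.enumerate lst).foldl
    (fun last p => if p.2 ≠ 0 then p.1 else last) (-1)
  if last = -1 then [] else PySem.List.slice lst none (some last)

-- ===== PRECONDITION & SPEC =====
def Spec_remove_trailing_zeros_and_last_entry (lst : List Int) (out : List Int) : Prop := out = remove_trailing_zeros_and_last_entry_alt lst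
instance (lst : List Int) (out : List Int) : Decidable (Spec_remove_trailing_zeros_and_last_entry lst out) := by unfold Spec_remove_trailing_zeros_and_last_entry; infer_instance

-- ===== CLAIM (what is proved, stated in full; the proofs are below) =====
def Claim_equal_remove_trailing_zeros_and_last_entry : Prop := ∀ (lst : List Int), Dom_remove_trailing_zeros_and_last_entry lst → Spec_remove_trailing_zeros_and_last_entry lst (remove_trailing_zeros_and_last_entry lst)

-- ===== LEMMAS AND PROOFS =====

-- B's loop state after scanning `lst` (start index s)
def pvLastNZ (lst : List Int) (s : Int) : Int :=
  (PySem.List.enumerate lst s).foldl (fun last p => if p.2 ≠ 0 then p.1 else last) s.pred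

theorem pvLastNZ_append (lst : List Int) (x : Int) :
    pvLastNZ (lst ++ [x]) 0 = if x ≠ 0 then (lst.length : Int) else pvLastNZ lst 0 := by
  unfold pvLastNZ
  rw [PySem.List.enumerate_append, List.foldl_append]
  simp [PySem.List.enumerate]

theorem pvLastNZ_bounds (lst : List Int) :
    pvLastNZ lst 0 = -1 ∨ (0 ≤ pvLastNZ lst 0 ∧ pvLastNZ lst 0 < (lst.length : Int)) := by
  induction lst using List.reverseRecOn with
  | nil => left; rfl
  | append_singleton l x ih =>
      rw [pvLastNZ_append]
      simp only [List.length_append, List.length_cons, List.length_nil]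
      split_ifs with h
      · right; push_cast; omega
      · rcases ih with h' | ⟨h1, h2⟩
        · left; exact h'
        · right; push_cast; omega

theorem alt_eq (lst : List Int) :
    remove_trailing_zeros_and_last_entry_alt lst =
      (if pvLastNZ lst 0 = -1 then [] else PySem.List.slice lst none (some (pvLastNZ lst 0))) := rfl

theorem A_append (lst : List Int) (x : Int) :
    remove_trailing_zeros_and_last_entry (lst ++ [x]) =
      if x ≠ 0 then lst else remove_trailing_zeros_and_last_entry lst := by
  unfold remove_trailing_zeros_and_last_entry
  simp only [PySem.List.slice?_none_none_neg_one, Option.getD_some, List.reverse_append,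
    List.reverse_cons, List.reverse_nil, List.nil_append, List.cons_append,
    PySem.List.enumerate]
  by_cases hx : x = 0
  · subst hx
    simp only [ne_eq, not_true_eq_false, if_false]
    have key : ∀ (r : List Int) (s : Int),
        pvA_findNZ (PySem.List.enumerate r (s + 1)) =
          (pvA_findNZ (PySem.List.enumerate r s)).map (· + 1) := by
      intro r
      induction r with
      | nil => intro s; rfl
      | cons a t ih =>
          intro s
          simp only [PySem.List.enumerate_cons, pvA_findNZ]
          by_cases ha : a = 0
          · simp [ha, ih]
          · simp [ha]
    have hred : pvA_findNZ ((0, (0 : Int)) :: PySem.List.enumerate lst.reverse (0 + 1)) =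
        pvA_findNZ (PySem.List.enumerate lst.reverse (0 + 1)) := by
      simp [pvA_findNZ]
    rw [hred, key lst.reverse 0]
    cases h : pvA_findNZ (PySem.List.enumerate lst.reverse) with
    | none => simp
    | some i =>
        simp only [Option.map_some]
        have hi : 0 ≤ i := by
          have aux : ∀ (r : List Int) (s : Int), 0 ≤ s →
              ∀ j, pvA_findNZ (PySem.List.enumerate r s) = some j → 0 ≤ j := by
            intro r
            induction r with
            | nil => intro s _ j hj; cases hj
            | cons a t ih =>
                intro s hs j hj
                simp only [PySem.List.enumerate_cons, pvA_findNZ] at hj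
                by_cases ha : a = 0
                · simp only [ha, ne_eq, not_true_eq_false, if_false] at hj
                  exact ih (s + 1) (by omega) j hj
                · simp only [ha, ne_eq, not_false_iff, if_pos, Option.some.injEq] at hj
                  omega
          exact aux lst.reverse 0 le_rfl i h
        rw [PySem.List.slice_from _ (show (0:Int) ≤ i + 1 + 1 by omega),
            PySem.List.slice_from _ (show (0:Int) ≤ i + 1 by omega)]
        have ht : (i + 1 + 1).toNat = (i + 1).toNat + 1 := by omega
        rw [ht, List.drop_succ_cons]
  · simp only [hx, ne_eq, not_false_iff, if_pos, pvA_findNZ]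
    rw [PySem.List.slice_from _ (show (0:Int) ≤ 0 + 1 by omega)]
    simp

theorem main_eq (lst : List Int) :
    remove_trailing_zeros_and_last_entry lst = remove_trailing_zeros_and_last_entry_alt lst := by
  induction lst using List.reverseRecOn with
  | nil => rfl
  | append_singleton l x ih =>
      rw [A_append, alt_eq, pvLastNZ_append]
      by_cases hx : x = 0
      · simp only [hx, ne_eq, not_true_eq_false, if_false]
        rw [ih, alt_eq]
        rcases pvLastNZ_bounds l with h | ⟨h1, h2⟩
        · simp [h]
        · have hne : pvLastNZ l 0 ≠ -1 := by omega
          simp only [hne, ite_false]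
          rw [PySem.List.slice_to _ h1, PySem.List.slice_to _ h1]
          rw [List.take_append_of_le_length (by omega)]
      · simp only [hx, ne_eq, not_false_iff, if_pos]
        have hne : (l.length : Int) ≠ -1 := by omega
        simp only [if_neg hne]
        rw [PySem.List.slice_to _ (Int.natCast_nonneg _)]
        simp

-- ===== VERDICT (by name: the statement is the Claim_ definition above) =====
theorem remove_trailing_zeros_and_last_entry_spec : Claim_equal_remove_trailing_zeros_and_last_entry := by
  intro lst _
  unfold Spec_remove_trailing_zeros_and_last_entry
  exact main_eq lst
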